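-- pv_equiv track=rewrite | github.com/Cigilipuf/whitehathackerai | src/utils/param_intelligence.py | prioritize_params_for_sqli
-- ===== SOURCE A (Python) =====
-- _SQLI_PARAMS: set[str] = {
--     "id", "uid", "user_id", "item_id", "product_id", "order_id", "category_id",
--     "cat", "sort", "order", "orderby", "sort_by", "column", "table", "where",
--     "filter", "limit", "offset", "page", "num", "count", "from", "to",
--     "year", "month", "day", "date", "start", "end", "group", "having",
--     "select", "query", "search", "q", "keyword", "term", "name", "username",
--     "email", "login", "password", "pass",
-- }
--
-- def prioritize_params_for_sqli(params: list[str]) -> list[str]: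
--     """Sort parameter URLs with SQLi-likely params first."""
--     def _score(url: str) -> int:
--         if "?" not in url:
--             return 0
--         qs = url.split("?", 1)[1]
--         names = [p.split("=", 1)[0].lower() for p in qs.split("&") if "=" in p]
--         return sum(1 for n in names if n in _SQLI_PARAMS)
--     return sorted(params, key=_score, reverse=True)
-- ===== SOURCE B (Python) =====
-- _SQLI_PARAMS: set[str] = set(
--     """
--     id uid user_id item_id product_id order_id category_id
--     cat sort order orderby sort_by column table where
--     filter limit offset page num count from to
--     year month day date start end group having
--     select query search q keyword term name username
--     email login password pass
--     """.split()
-- )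
-- def prioritize_params_for_sqli(params: list[str]) -> list[str]:
--     """Sort parameter URLs with SQLi-likely params first (stable distribution sort on the score)."""
--     def _score(url: str) -> int:
--         if "?" not in url:
--             return 0
--         total = 0
--         for p in url.split("?", 1)[1].split("&"):
--             if "=" in p and p.split("=", 1)[0].lower() in _SQLI_PARAMS:
--                 total += 1
--         return total
--     scored = [(_score(u), u) for u in params]
--     top = 0
--     for s, _ in scored:
--         if s > top:
--             top = s
--     out = []
--     for t in range(top, -1, -1):
--         for s, u in scored:
--             if s == t:
--                 out.append(u)
--     return out
-- ===== Notes on version B (the rewrite author's own statement) =====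
-- stated objective: alternative
-- what changed: Replaces the comparison sort (sorted(key=_score, reverse=True)) with a stable distribution sort: each URL's score is computed once, the maximum score is found in one pass, and the output is emitted bucket by bucket from the top score down to 0.
import Mathlib
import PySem

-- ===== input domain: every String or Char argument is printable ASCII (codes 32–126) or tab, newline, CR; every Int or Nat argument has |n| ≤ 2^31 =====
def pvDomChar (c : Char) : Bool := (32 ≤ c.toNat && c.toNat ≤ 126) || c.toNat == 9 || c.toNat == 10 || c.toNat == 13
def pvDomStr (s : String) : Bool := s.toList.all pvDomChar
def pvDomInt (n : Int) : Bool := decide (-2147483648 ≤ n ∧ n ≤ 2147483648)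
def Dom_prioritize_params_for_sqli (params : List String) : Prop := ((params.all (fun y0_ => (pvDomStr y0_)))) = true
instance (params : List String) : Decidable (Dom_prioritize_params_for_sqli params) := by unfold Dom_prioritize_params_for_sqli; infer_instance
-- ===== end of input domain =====

-- B replaces the comparison sort by a stable distribution (bucket) sort on the score; same return value, no speed claim.

-- ===== PORT A =====
-- _SQLI_PARAMS (a Python set literal)
def sqliParamsSet : PySem.Set String := PySem.Set.ofList
  ["id", "uid", "user_id", "item_id", "product_id", "order_id", "category_id",
   "cat", "sort", "order", "orderby", "sort_by", "column", "table", "where",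
   "filter", "limit", "offset", "page", "num", "count", "from", "to",
   "year", "month", "day", "date", "start", "end", "group", "having",
   "select", "query", "search", "q", "keyword", "term", "name", "username",
   "email", "login", "password", "pass"]

-- the inner _score (identical in Source A and Source B); the two list indexings [1] and [0]
-- are guarded in Python ("?" in url / "=" in p guarantee the parts exist), so getD is exact there
def sqliScore (url : String) : Int :=
  if PySem.Str.isIn "?" url then
    let qs := ((PySem.Str.splitMax? url "?" 1).getD []).getD 1 ""
    let names := (((PySem.Str.split? qs "&").getD []).filter
        (fun p => PySem.Str.isIn "=" p)).map
        (fun p => PySem.Str.lower (((PySem.Str.splitMax? p "=" 1).getD []).getD 0 ""))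
    ((names.countP (fun n => PySem.Set.contains sqliParamsSet n)) : Int)
  else 0

def prioritize_params_for_sqli (params : List String) : List String :=
  PySem.List.sorted params sqliScore true

-- ===== PORT B =====
-- B's _score: an explicit accumulator loop over the query parts (Source B), same guarded indexings
def sqliScoreAlt (url : String) : Int :=
  if PySem.Str.isIn "?" url then
    (((PySem.Str.split? (((PySem.Str.splitMax? url "?" 1).getD []).getD 1 "") "&").getD []).foldl
      (fun total p =>
        if PySem.Str.isIn "=" p &&
            PySem.Set.contains sqliParamsSet
              (PySem.Str.lower (((PySem.Str.splitMax? p "=" 1).getD []).getD 0 "")) then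
          total + 1
        else total) (0 : Int))
  else 0

def prioritize_params_for_sqli_alt (params : List String) : List String :=
  let scored := params.map (fun u => (sqliScoreAlt u, u))
  let top := scored.foldl (fun acc p => if p.1 > acc then p.1 else acc) 0
  (PySem.List.pyRange top (-1) (-1)).foldl
    (fun out t => scored.foldl (fun out p => if p.1 = t then out ++ [p.2] else out) out) []

-- ===== PRECONDITION & SPEC =====
def Spec_prioritize_params_for_sqli (params : List String) (out : List String) : Prop := out = prioritize_params_for_sqli_alt params
instance (params : List String) (out : List String) : Decidable (Spec_prioritize_params_for_sqli params out) := by unfold Spec_prioritize_params_for_sqli; infer_instance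

-- ===== CLAIM (what is proved, stated in full; the proofs are below) =====
def Claim_equal_prioritize_params_for_sqli : Prop := ∀ (params : List String), Dom_prioritize_params_for_sqli params → Spec_prioritize_params_for_sqli params (prioritize_params_for_sqli params)

-- ===== LEMMAS AND PROOFS =====

-- B's accumulator loop computes A's comprehension count
theorem sqliScoreAlt_eq (url : String) : sqliScoreAlt url = sqliScore url := by
  unfold sqliScoreAlt sqliScore
  split
  · dsimp only
    rw [PySem.List.foldl_count_if, List.countP_map, List.countP_filter]
    rw [zero_add, Int.natCast_inj]
    exact List.countP_congr (fun p _ => by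
      simp only [Function.comp_apply]
      rw [Bool.and_comm])
  · rfl

-- the bucket of score t, and the concatenation of buckets n, n-1, …, 0
def sqliBucket (xs : List String) (t : Int) : List String :=
  xs.filter (fun u => decide (sqliScore u = t))

def sqliJoin (xs : List String) : Nat → List String
  | 0 => sqliBucket xs 0
  | n+1 => sqliBucket xs (n+1) ++ sqliJoin xs n

theorem sqliScore_nonneg (u : String) : 0 ≤ sqliScore u := by
  unfold sqliScore; split <;> simp

theorem mem_sqliBucket {xs : List String} {t : Int} {y : String}
    (h : y ∈ sqliBucket xs t) : sqliScore y = t := by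
  unfold sqliBucket at h
  simpa using (List.of_mem_filter h)

theorem mem_sqliJoin_le {xs : List String} {y : String} :
    ∀ n : Nat, y ∈ sqliJoin xs n → sqliScore y ≤ (n : Int) := by
  intro n
  induction n with
  | zero => intro h; simp [sqliJoin] at h; exact le_of_eq (mem_sqliBucket h)
  | succ n ih =>
    intro h
    rcases List.mem_append.mp h with h | h
    · exact le_of_eq (mem_sqliBucket h)
    · have := ih h; push_cast; omega

theorem sqliBucket_append_singleton (xs : List String) (x : String) (t : Int) :
    sqliBucket (xs ++ [x]) t =
      sqliBucket xs t ++ (if sqliScore x = t then [x] else []) := by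
  unfold sqliBucket
  simp [List.filter_append]
  split_ifs with h <;> simp [h]

theorem sqliJoin_append_of_gt (xs : List String) (x : String) :
    ∀ n : Nat, (n : Int) < sqliScore x → sqliJoin (xs ++ [x]) n = sqliJoin xs n := by
  intro n
  induction n with
  | zero =>
    intro h
    have hx : sqliScore x ≠ (0 : Int) := by omega
    simp [sqliJoin, sqliBucket_append_singleton, hx]
  | succ n ih =>
    intro h
    have h' : (n : Int) < sqliScore x := by push_cast at h ⊢; omega
    have hx : ¬ sqliScore x = ((n : Int) + 1) := by push_cast at h; omega
    simp [sqliJoin, sqliBucket_append_singleton, hx, ih h']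

theorem insertBy_append_not_before {α : Type} (before : α → α → Bool) (x : α)
    (ys zs : List α) (h : ∀ y ∈ ys, before x y = false) :
    PySem.List.insertBy before x (ys ++ zs) = ys ++ PySem.List.insertBy before x zs := by
  induction ys with
  | nil => simp
  | cons y ys ih =>
    have hy : before x y = false := h y (by simp)
    simp [PySem.List.insertBy, hy, ih (fun a ha => h a (by simp [ha]))]

theorem insertBy_all_before {α : Type} (before : α → α → Bool) (x : α)
    (ys : List α) (h : ∀ y ∈ ys, before x y = true) :
    PySem.List.insertBy before x ys = x :: ys := by
  cases ys with
  | nil => simp [PySem.List.insertBy]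
  | cons y ys => simp [PySem.List.insertBy, h y (by simp)]

theorem insertBy_sqliJoin (x : String) :
    ∀ (n : Nat) (xs : List String), sqliScore x ≤ (n : Int) →
      PySem.List.insertBy (fun a b => decide (sqliScore b < sqliScore a)) x (sqliJoin xs n)
        = sqliJoin (xs ++ [x]) n := by
  intro n
  induction n with
  | zero =>
    intro xs h
    have hx : sqliScore x = 0 := le_antisymm (by simpa using h) (sqliScore_nonneg x)
    have hb : ∀ y ∈ sqliJoin xs 0, (fun a b => decide (sqliScore b < sqliScore a)) x y = false := by
      intro y hy
      have h1 := mem_sqliJoin_le 0 hy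
      have h2 := sqliScore_nonneg y
      simp; omega
    simp only [sqliJoin] at *
    rw [PySem.List.insertBy_of_forall_not_before _ _ _ hb,
        sqliBucket_append_singleton, if_pos hx]
  | succ n ih =>
    intro xs h
    by_cases hx : sqliScore x = ((n : Int) + 1)
    · -- x belongs to the top bucket: skip it, then x goes before everything below
      have hb : ∀ y ∈ sqliBucket xs ((n : Int) + 1),
          (fun a b => decide (sqliScore b < sqliScore a)) x y = false := by
        intro y hy; have := mem_sqliBucket hy; simp; omega
      have hlow : ∀ y ∈ sqliJoin xs n,
          (fun a b => decide (sqliScore b < sqliScore a)) x y = true := by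
        intro y hy; have := mem_sqliJoin_le n hy; simp; omega
      have hgt : (n : Int) < sqliScore x := by omega
      simp only [sqliJoin]
      rw [show ((n : Nat) + 1 : Int) = ((n : Int) + 1) by omega] at *
      rw [insertBy_append_not_before _ _ _ _ hb, insertBy_all_before _ _ _ hlow,
          sqliBucket_append_singleton, if_pos hx, sqliJoin_append_of_gt xs x n hgt]
      simp
    · have hle : sqliScore x ≤ (n : Int) := by push_cast at h; omega
      have hb : ∀ y ∈ sqliBucket xs ((n : Int) + 1),
          (fun a b => decide (sqliScore b < sqliScore a)) x y = false := by
        intro y hy; have := mem_sqliBucket hy; simp; omega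
      simp only [sqliJoin]
      rw [show ((n : Nat) + 1 : Int) = ((n : Int) + 1) by omega] at *
      rw [insertBy_append_not_before _ _ _ _ hb, ih xs hle,
          sqliBucket_append_singleton, if_neg hx]
      simp

theorem sqliJoin_nil : ∀ n : Nat, sqliJoin [] n = [] := by
  intro n; induction n with
  | zero => simp [sqliJoin, sqliBucket]
  | succ n ih => simp [sqliJoin, sqliBucket, ih]

theorem sorted_eq_sqliJoin :
    ∀ (xs : List String) (n : Nat), (∀ u ∈ xs, sqliScore u ≤ (n : Int)) →
      PySem.List.sorted xs sqliScore true = sqliJoin xs n := by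
  intro xs
  induction xs using List.reverseRecOn with
  | nil => intro n _; simp [PySem.List.sorted_rev_eq_foldl_insertBy, sqliJoin_nil]
  | append_singleton xs x ih =>
    intro n h
    have hx : sqliScore x ≤ (n : Int) := h x (by simp)
    rw [PySem.List.sorted_rev_eq_foldl_insertBy, List.foldl_append]
    simp only [List.foldl_cons, List.foldl_nil]
    rw [← PySem.List.sorted_rev_eq_foldl_insertBy,
        ih n (fun u hu => h u (by simp [hu])),
        insertBy_sqliJoin x n xs hx]

def descInts : Nat → List Int
  | 0 => [0]
  | n+1 => ((n+1 : Nat) : Int) :: descInts n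

theorem range_map_eq_descInts :
    ∀ n : Nat, (List.range (n+1)).map (fun k : Nat => ((n : Int) - (k : Int))) = descInts n := by
  intro n
  induction n with
  | zero => simp [descInts]
  | succ n ih =>
    rw [List.range_succ_eq_map, List.map_cons, List.map_map]
    have h2 : (List.range (n+1)).map ((fun k : Nat => (((n+1 : Nat) : Int)) - (k : Int)) ∘ (· + 1))
        = (List.range (n+1)).map (fun k : Nat => ((n : Int) - (k : Int))) :=
      List.map_congr_left (fun k _ => by simp only [Function.comp_apply]; push_cast; ring)
    rw [h2, ih]
    simp [descInts]

theorem descInts_flatMap_eq_sqliJoin (xs : List String) :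
    ∀ n : Nat, (descInts n).flatMap (sqliBucket xs) = sqliJoin xs n := by
  intro n
  induction n with
  | zero => simp [descInts, sqliJoin]
  | succ n ih => simp [descInts, sqliJoin, ih]

theorem alt_eq_sqliJoin_and_sorted (params : List String) :
    prioritize_params_for_sqli params = prioritize_params_for_sqli_alt params := by
  unfold prioritize_params_for_sqli prioritize_params_for_sqli_alt
  simp only [sqliScoreAlt_eq]
  set scored := params.map (fun u => (sqliScore u, u)) with hscored
  have hfun : (fun (acc : Int) (p : Int × String) => if p.1 > acc then p.1 else acc)
      = fun acc p => max acc p.1 := by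
    funext acc p
    by_cases h : acc < p.1
    · simp [h, max_eq_right h.le]
    · simp [h, max_eq_left (not_lt.mp h)]
  set top := scored.foldl (fun acc p => max acc p.1) 0 with htop
  have hmax := PySem.List.le_foldl_max_int scored Prod.fst 0
  have htop0 : 0 ≤ top := hmax.1
  have hbound : ∀ u ∈ params, sqliScore u ≤ top := by
    intro u hu
    exact hmax.2 (sqliScore u, u) (by rw [hscored]; exact List.mem_map.mpr ⟨u, hu, rfl⟩)
  rw [hfun, ← htop]
  -- inner loop = append the bucket
  have hinner : ∀ (out : List String) (t : Int),
      scored.foldl (fun out p => if p.1 = t then out ++ [p.2] else out) out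
        = out ++ sqliBucket params t := by
    intro out t
    rw [show (fun (out : List String) (p : Int × String) => if p.1 = t then out ++ [p.2] else out)
        = (fun out p => if decide (p.1 = t) = true then out ++ [p.2] else out) by
          funext o p; simp]
    rw [PySem.List.foldl_append_if (fun p => decide (p.1 = t)) Prod.snd scored out]
    unfold sqliBucket
    rw [hscored, List.filter_map]
    simp [Function.comp_def]
  have houter : ∀ (init : List String),
      (PySem.List.pyRange top (-1) (-1)).foldl
        (fun out t => scored.foldl (fun out p => if p.1 = t then out ++ [p.2] else out) out) init
      = init ++ (PySem.List.pyRange top (-1) (-1)).flatMap (sqliBucket params) := by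
    intro init
    rw [show (fun (out : List String) (t : Int) =>
          scored.foldl (fun out p => if p.1 = t then out ++ [p.2] else out) out)
        = (fun out t => out ++ sqliBucket params t) by funext o t; rw [hinner]]
    exact PySem.List.foldl_append_eq_flatMap (sqliBucket params) _ init
  rw [houter, List.nil_append, PySem.List.pyRange_neg_one]
  have hcast : top = ((top.toNat : Nat) : Int) := by omega
  have hrange : (top - (-1)).toNat = top.toNat + 1 := by omega
  rw [hrange]
  have hm : (List.range (top.toNat + 1)).map (fun k : Nat => top - (k : Int))
      = (List.range (top.toNat + 1)).map (fun k : Nat => ((top.toNat : Int)) - (k : Int)) :=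
    List.map_congr_left (fun k _ => by rw [← hcast])
  rw [hm, range_map_eq_descInts, descInts_flatMap_eq_sqliJoin params top.toNat]
  exact sorted_eq_sqliJoin params top.toNat (fun u hu => by rw [← hcast]; exact hbound u hu)

-- ===== VERDICT (by name: the statement is the Claim_ definition above) =====
theorem prioritize_params_for_sqli_spec : Claim_equal_prioritize_params_for_sqli := by
  intro params _
  unfold Spec_prioritize_params_for_sqli
  exact alt_eq_sqliJoin_and_sorted params
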